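-- pv_equiv track=rewrite | github.com/Akashleena/Yannakakis_algorithm | yannakakis_functions_v3.py | semi_join
-- ===== SOURCE A (Python) =====
-- def semi_join(parent_relation, child_relation, join_attributes):
--     """
--     Performs a semi-join between parent and child relations.
--     """
--     parent_tuples = set(
--         tuple(parent_relation[attr][i] for attr in join_attributes)
--         for i in range(len(parent_relation[join_attributes[0]]))
--     )
--     filtered_child_relation = {key: [] for key in child_relation}
--     for i in range(len(child_relation[join_attributes[0]])):
--         child_tuple = tuple(child_relation[attr][i] for attr in join_attributes)
--         if child_tuple in parent_tuples:
--             for key in child_relation: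
--                 filtered_child_relation[key].append(child_relation[key][i])
--     return filtered_child_relation
-- ===== SOURCE B (Python) =====
-- def semi_join(parent_relation, child_relation, join_attributes):
--     """
--     Sort-based semi-join: no hash set at all. The parent key tuples are
--     collected into a sorted array (duplicates and all); each child row is
--     tested by binary search in that array; the matching row indices are
--     collected once and every output column is gathered from them.
--     (Hand-rolled bisection because this module imports nothing.)
--     """
--     parent_keys = sorted(
--         tuple(parent_relation[attr][i] for attr in join_attributes)
--         for i in range(len(parent_relation[join_attributes[0]]))
--     )
--
--     def member(t):
--         lo, hi = 0, len(parent_keys)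
--         while lo < hi:
--             mid = (lo + hi) // 2
--             if parent_keys[mid] < t:
--                 lo = mid + 1
--             else:
--                 hi = mid
--         return lo < len(parent_keys) and parent_keys[lo] == t
--
--     matching = [i for i in range(len(child_relation[join_attributes[0]]))
--                 if member(tuple(child_relation[attr][i] for attr in join_attributes))]
--     return {key: [child_relation[key][i] for i in matching] for key in child_relation}
-- ===== Notes on version B (the rewrite author's own statement) =====
-- stated objective: alternative
-- what changed: A builds a hash set of parent key tuples and, row by row, appends every column value of a matching child row inside the loop; B uses no set at all: it sorts the list of parent key tuples, decides each child row by a hand-rolled binary search, and then gathers the matching row indices into each output column independently.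
import Mathlib
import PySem

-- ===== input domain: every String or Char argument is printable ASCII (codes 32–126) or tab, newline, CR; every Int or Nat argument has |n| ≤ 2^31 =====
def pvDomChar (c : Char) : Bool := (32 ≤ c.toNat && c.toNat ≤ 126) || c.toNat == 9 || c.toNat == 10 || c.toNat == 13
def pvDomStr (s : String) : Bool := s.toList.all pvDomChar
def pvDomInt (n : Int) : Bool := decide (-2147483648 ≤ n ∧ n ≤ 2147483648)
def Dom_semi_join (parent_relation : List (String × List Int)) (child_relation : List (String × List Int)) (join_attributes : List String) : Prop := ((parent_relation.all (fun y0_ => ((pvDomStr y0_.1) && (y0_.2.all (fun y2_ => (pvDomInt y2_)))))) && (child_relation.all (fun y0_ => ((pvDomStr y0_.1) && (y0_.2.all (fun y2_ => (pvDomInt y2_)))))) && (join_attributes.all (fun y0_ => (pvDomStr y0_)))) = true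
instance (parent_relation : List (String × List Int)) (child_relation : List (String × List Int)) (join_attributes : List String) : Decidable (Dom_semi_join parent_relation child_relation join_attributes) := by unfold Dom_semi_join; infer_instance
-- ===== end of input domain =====

-- B replaces A's hash-set-and-append semi-join by a sort-based one: the parent
-- key tuples are sorted and each child row is decided by binary search; the
-- matching indices are then gathered per column (alternative algorithm, not
-- claimed faster).

-- ===== PORT A =====
-- rel[attr] for the assoc-list encoding of a dict: first matching key ([] never
-- reached under Pre_, which requires the key to be present).
def pvLook (rel : List (String × List Int)) (a : String) : List Int :=
  match rel with
  | [] => []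
  | (k, v) :: t => if k = a then v else pvLook t a

-- tuple(rel[attr][i] for attr in join_attributes); default 0 never reached under Pre_
def pvRow (rel : List (String × List Int)) (join_attributes : List String) (i : Int) : List Int :=
  join_attributes.map (fun a => PySem.List.pyGetD (pvLook rel a) i 0)

-- filtered_child_relation[key].append(x): modify the (unique) entry with this key
def pvApp (d : List (String × List Int)) (key : String) (x : Int) : List (String × List Int) :=
  match d with
  | [] => []
  | (k, v) :: t => if k = key then (k, v ++ [x]) :: t else (k, v) :: pvApp t key x

def semi_join (parent_relation : List (String × List Int)) (child_relation : List (String × List Int)) (join_attributes : List String) : List (String × List Int) :=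
  let ja0 := PySem.List.pyGetD join_attributes 0 ""
  let parent_tuples : PySem.Set (List Int) :=
    PySem.Set.ofList ((PySem.List.pyRange 0 ((pvLook parent_relation ja0).length : Int) 1).map
      (fun i => pvRow parent_relation join_attributes i))
  let init := child_relation.map (fun kv => (kv.1, ([] : List Int)))
  (PySem.List.pyRange 0 ((pvLook child_relation ja0).length : Int) 1).foldl
    (fun acc i =>
      if PySem.Set.contains parent_tuples (pvRow child_relation join_attributes i) then
        (child_relation.map Prod.fst).foldl
          (fun d key => pvApp d key (PySem.List.pyGetD (pvLook child_relation key) i 0)) acc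
      else acc)
    init

-- ===== PORT B =====
-- Source B's hand-written bisection loop (while lo < hi: …), step for step;
-- (lo+hi)//2 on nonnegative ints is Nat division, exact here; the
-- list index parent_keys[mid] stays in range because lo < hi ≤ keys.length is
-- maintained, so getD's default is never read.
def pvBS (keys : List (List Int)) (t : List Int) (lo hi : Nat) : Nat :=
  if _h : lo < hi then
    let mid := (lo + hi) / 2
    if keys.getD mid [] < t then pvBS keys t (mid + 1) hi else pvBS keys t lo mid
  else lo
termination_by hi - lo
decreasing_by all_goals omega

-- Source B's member(t): lo < len(parent_keys) and parent_keys[lo] == t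
def pvMember (keys : List (List Int)) (t : List Int) : Bool :=
  let lo := pvBS keys t 0 keys.length
  decide (lo < keys.length) && (keys.getD lo [] == t)

def semi_join_alt (parent_relation : List (String × List Int)) (child_relation : List (String × List Int)) (join_attributes : List String) : List (String × List Int) :=
  let ja0 := PySem.List.pyGetD join_attributes 0 ""
  let parent_keys : List (List Int) :=
    PySem.List.sorted ((PySem.List.pyRange 0 ((pvLook parent_relation ja0).length : Int) 1).map
      (fun i => pvRow parent_relation join_attributes i)) (fun x => x) false
  let matching := (PySem.List.pyRange 0 ((pvLook child_relation ja0).length : Int) 1).filter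
    (fun i => pvMember parent_keys (pvRow child_relation join_attributes i))
  child_relation.map (fun kv => (kv.1, matching.map (fun i => PySem.List.pyGetD (pvLook child_relation kv.1) i 0)))

-- ===== PRECONDITION & SPEC =====
-- Pre_ excludes the inputs on which Python A raises: empty join_attributes
-- (IndexError), a join attribute missing from either dict (KeyError), a parent
-- join column shorter than the first one, and any child column shorter than the
-- first join column (IndexError when a row index reaches a short column; on a
-- ragged child whose short non-join columns are never hit by a MATCHING row A
-- still returns — see the cite — so Pre_ is slightly narrower there);
-- duplicate keys are excluded because a Python dict cannot carry them.
-- (pvLook here is only the assoc-list dict lookup of the type convention —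
-- first matching key — used to name a column's length, not a re-run of either
-- algorithm.)
def Pre_semi_join (parent_relation : List (String × List Int)) (child_relation : List (String × List Int)) (join_attributes : List String) : Prop :=
  join_attributes ≠ [] ∧
  (parent_relation.map Prod.fst).Nodup ∧
  (child_relation.map Prod.fst).Nodup ∧
  (∀ a ∈ join_attributes, a ∈ parent_relation.map Prod.fst ∧ a ∈ child_relation.map Prod.fst) ∧
  (∀ a ∈ join_attributes,
    (pvLook parent_relation (join_attributes.headD "")).length ≤ (pvLook parent_relation a).length) ∧
  (∀ kv ∈ child_relation,
    (pvLook child_relation (join_attributes.headD "")).length ≤ kv.2.length)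
instance (parent_relation : List (String × List Int)) (child_relation : List (String × List Int)) (join_attributes : List String) : Decidable (Pre_semi_join parent_relation child_relation join_attributes) := by unfold Pre_semi_join; infer_instance

def pvWitness_semi_join : (List (String × List Int)) × (List (String × List Int)) × List String :=
  ([("a", [1, 2])], [("a", [2, 3]), ("b", [7, 8])], ["a"])

def Spec_semi_join (parent_relation : List (String × List Int)) (child_relation : List (String × List Int)) (join_attributes : List String) (out : List (String × List Int)) : Prop := out = semi_join_alt parent_relation child_relation join_attributes
instance (parent_relation : List (String × List Int)) (child_relation : List (String × List Int)) (join_attributes : List String) (out : List (String × List Int)) : Decidable (Spec_semi_join parent_relation child_relation join_attributes out) := by unfold Spec_semi_join; infer_instance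

-- ===== CLAIM (what is proved, stated in full; the proofs are below) =====
def Claim_equal_semi_join : Prop := ∀ (parent_relation : List (String × List Int)) (child_relation : List (String × List Int)) (join_attributes : List String), Dom_semi_join parent_relation child_relation join_attributes → Pre_semi_join parent_relation child_relation join_attributes → Spec_semi_join parent_relation child_relation join_attributes (semi_join parent_relation child_relation join_attributes)

-- ===== LEMMAS AND PROOFS =====

-- Folding pvApp over keys all different from the head key leaves the head entry alone.
theorem pvApp_fold_skip (f : String → Int) (k : String) :
    ∀ (ks : List String), (∀ x ∈ ks, x ≠ k) → ∀ (hd : List Int) (tail : List (String × List Int)),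
      ks.foldl (fun acc k' => pvApp acc k' (f k')) ((k, hd) :: tail)
        = (k, hd) :: ks.foldl (fun acc k' => pvApp acc k' (f k')) tail := by
  intro ks
  induction ks with
  | nil => intro _ hd tail; simp
  | cons x xs ih =>
    intro h hd tail
    have hx : x ≠ k := h x (by simp)
    simp only [List.foldl_cons, pvApp]
    rw [if_neg (show ¬ k = x from fun h' => hx h'.symm)]
    exact ih (fun y hy => h y (by simp [hy])) hd _

-- Inner loop: appending f k to every entry of a nodup-keyed assoc list, key by key.
theorem pvApp_fold_all (f : String → Int) :
    ∀ (d : List (String × List Int)), (d.map Prod.fst).Nodup →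
      ∀ (g : String × List Int → List Int),
      (d.map Prod.fst).foldl (fun acc k => pvApp acc k (f k)) (d.map (fun kv => (kv.1, g kv)))
        = d.map (fun kv => (kv.1, g kv ++ [f kv.1])) := by
  intro d
  induction d with
  | nil => intro _ g; simp
  | cons kv t ih =>
    intro hnd g
    obtain ⟨k, v⟩ := kv
    simp only [List.map_cons, List.foldl_cons, pvApp, if_true]
    have hnd' := (List.nodup_cons.mp hnd)
    rw [pvApp_fold_skip f k (t.map Prod.fst)
          (fun x hx hxk => hnd'.1 (hxk ▸ hx)) (g (k, v) ++ [f k]) _]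
    rw [ih hnd'.2 g]

-- Outer loop: A's row loop over a nodup-keyed child equals per-key gathering of
-- the filtered index list.
theorem row_loop_eq (c : List (String × List Int)) (pred : Int → Bool) (val : String → Int → Int)
    (hnd : (c.map Prod.fst).Nodup) :
    ∀ (is : List Int) (g : String × List Int → List Int),
      is.foldl
        (fun acc i =>
          if pred i then
            (c.map Prod.fst).foldl (fun d key => pvApp d key (val key i)) acc
          else acc)
        (c.map (fun kv => (kv.1, g kv)))
        = c.map (fun kv => (kv.1, g kv ++ (is.filter pred).map (val kv.1))) := by
  intro is
  induction is with
  | nil => intro g; simp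
  | cons i is ih =>
    intro g
    by_cases hp : pred i
    · rw [List.foldl_cons, if_pos hp,
          pvApp_fold_all (fun key => val key i) c hnd g,
          ih (fun kv => g kv ++ [val kv.1 i])]
      simp [hp]
    · rw [List.foldl_cons, if_neg hp, ih g]
      simp [hp]

-- getD-monotonicity of a (≤)-sorted key list on in-range indices.
theorem pvGetD_mono (keys : List (List Int)) (hs : keys.Pairwise (· ≤ ·))
    {p q : Nat} (hpq : p ≤ q) (hq : q < keys.length) :
    keys.getD p [] ≤ keys.getD q [] := by
  rw [List.getD_eq_getElem keys [] (lt_of_le_of_lt hpq hq), List.getD_eq_getElem keys [] hq]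
  rcases Nat.lt_or_eq_of_le hpq with h | h
  · exact (List.pairwise_iff_getElem.mp hs) p q _ _ h
  · subst h; exact le_rfl

theorem pvBS_spec (keys : List (List Int)) (t : List Int) (hs : keys.Pairwise (· ≤ ·)) :
    ∀ (lo hi : Nat), hi ≤ keys.length →
      min lo hi ≤ pvBS keys t lo hi ∧ pvBS keys t lo hi ≤ max lo hi ∧
      (∀ m, lo ≤ m → m < pvBS keys t lo hi → keys.getD m [] < t) ∧
      (pvBS keys t lo hi < hi → ¬ keys.getD (pvBS keys t lo hi) [] < t) := by
  intro lo hi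
  fun_induction pvBS keys t lo hi with
  | case1 lo hi h mid hlt ih =>
    intro hlen
    obtain ⟨i1, i2, i3, i4⟩ := ih hlen
    refine ⟨by omega, by omega, ?_, i4⟩
    intro m hm hmr
    rcases Nat.lt_or_ge m (mid + 1) with hm' | hm'
    · exact lt_of_le_of_lt (pvGetD_mono keys hs (by omega) (by omega)) hlt
    · exact i3 m hm' hmr
  | case2 lo hi h mid hlt ih =>
    intro hlen
    obtain ⟨i1, i2, i3, i4⟩ := ih (by omega)
    refine ⟨by omega, by omega, i3, ?_⟩
    intro _
    rcases Nat.lt_or_ge (pvBS keys t lo mid) mid with hr | hr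
    · exact i4 hr
    · have : pvBS keys t lo mid = mid := by omega
      rw [this]; exact hlt
  | case3 lo hi h =>
    intro _
    exact ⟨by omega, by omega, fun m hm hmr => by omega, fun hlh => absurd hlh (by omega)⟩

theorem pvMember_eq_contains (keys : List (List Int)) (t : List Int)
    (hs : keys.Pairwise (· ≤ ·)) : pvMember keys t = keys.contains t := by
  obtain ⟨-, hle, hlt, hnl⟩ := pvBS_spec keys t hs 0 keys.length le_rfl
  unfold pvMember
  rw [Bool.eq_iff_iff]
  simp only [Bool.and_eq_true, decide_eq_true_eq, beq_iff_eq, List.contains_iff_mem]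
  constructor
  · rintro ⟨hr, he⟩
    rw [List.getD_eq_getElem keys [] hr] at he
    exact he ▸ List.getElem_mem hr
  · intro ht
    obtain ⟨i, hi, hit⟩ := List.mem_iff_getElem.mp ht
    have hri : pvBS keys t 0 keys.length ≤ i := by
      by_contra hc
      have h1 : keys.getD i [] < t := hlt i (Nat.zero_le i) (by omega)
      rw [List.getD_eq_getElem keys [] hi, hit] at h1
      exact lt_irrefl t h1
    have hr : pvBS keys t 0 keys.length < keys.length := by omega
    refine ⟨hr, le_antisymm ?_ ?_⟩
    · calc keys.getD (pvBS keys t 0 keys.length) [] ≤ keys.getD i [] := pvGetD_mono keys hs hri hi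
        _ = t := by rw [List.getD_eq_getElem keys [] hi]; exact hit
    · exact le_of_not_gt (by simpa using hnl hr)


-- Sortedness of Source B's parent_keys: sorted(xs) is Pairwise (≤).
-- (PySem.List.sorted_pairwise, transported to the Decidable instance the port
-- elaborates with; Decidable is a subsingleton.)
theorem sorted_id_pairwise_le (rows : List (List Int)) :
    (PySem.List.sorted rows (fun x => x) false).Pairwise (· ≤ ·) := by
  have h : (fun (a b : List ℤ) => a.decidableLT b)
      = (@LinearOrder.toDecidableLT _ List.instLinearOrder) := Subsingleton.elim _ _
  show (@PySem.List.sorted (List ℤ) (List ℤ) List.instLT (fun a b => a.decidableLT b)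
      rows (fun x => x) false).Pairwise (· ≤ ·)
  rw [h]
  exact PySem.List.sorted_pairwise rows (fun x => x)

-- B's binary-search membership in sorted(rows) is A's set membership.
theorem pvMember_sorted_eq (rows : List (List Int)) (t : List Int) :
    pvMember (PySem.List.sorted rows (fun x => x) false) t
      = PySem.Set.contains (PySem.Set.ofList rows) t := by
  rw [pvMember_eq_contains _ _ (sorted_id_pairwise_le rows), Bool.eq_iff_iff]
  simp [PySem.List.mem_sorted, PySem.Set.mem_ofList]

-- ===== VERDICT (by name: the statement is the Claim_ definition above) =====
theorem semi_join_spec : Claim_equal_semi_join := by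
  intro p c j _ hpre
  unfold Spec_semi_join semi_join semi_join_alt
  have hnd := hpre.2.2.1
  have hA := row_loop_eq c
      (fun i => PySem.Set.contains
        (PySem.Set.ofList ((PySem.List.pyRange 0 ((pvLook p (PySem.List.pyGetD j 0 "")).length : Int) 1).map
          (fun i => pvRow p j i)))
        (pvRow c j i))
      (fun key i => PySem.List.pyGetD (pvLook c key) i 0) hnd
      (PySem.List.pyRange 0 ((pvLook c (PySem.List.pyGetD j 0 "")).length : Int) 1)
      (fun _ => [])
  simp only [List.nil_append] at hA
  rw [hA]
  have hpred : (fun i => PySem.Set.contains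
        (PySem.Set.ofList ((PySem.List.pyRange 0 ((pvLook p (PySem.List.pyGetD j 0 "")).length : Int) 1).map
          (fun i => pvRow p j i)))
        (pvRow c j i))
      = (fun i => pvMember
          (PySem.List.sorted ((PySem.List.pyRange 0 ((pvLook p (PySem.List.pyGetD j 0 "")).length : Int) 1).map
            (fun i => pvRow p j i)) (fun x => x) false)
          (pvRow c j i)) :=
    funext fun i => (pvMember_sorted_eq _ _).symm
  rw [hpred]
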